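-- pv_equiv track=rewrite | github.com/parthray16/CSC480 | Project 4/mineshafted.py | get_explorable_idx
-- ===== SOURCE A (Python) =====
-- from typing import Callable, Generator, List, Tuple, Set, Dict
--
-- def get_explorable_idx(domain_dict: Dict, explored_set: Set, mine_set: Set)\
--         -> Tuple[Set[int], Set[int]]:
--     explorable_set: Set = set()
--     for domain in domain_dict.values():
--         if len(domain) == 1:
--             for idx in domain[0]:
--                 if idx not in explored_set and idx not in explorable_set:
--                     if idx < 0:
--                         explorable_set.add(abs(idx))
--                     else:
--                         mine_set.add(idx)
--         else:  # find consistent idx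
--             for idx in domain[0]:
--                 inall = True
--                 if idx not in explored_set and idx not in explorable_set:
--                     for other in domain[1:]:
--                         inall = inall and (idx in other)
--                     if inall:
--                         if idx < 0:
--                             explorable_set.add(abs(idx))
--                         else:
--                             mine_set.add(idx)
--     return mine_set, explorable_set
-- ===== SOURCE B (Python) =====
-- def get_explorable_idx(domain_dict, explored_set, mine_set):
--     # Return-value equivalent to A; does not mutate mine_set (A does).
--     mines = set(mine_set)
--     explorable = set()
--     for domain in domain_dict.values():
--         consistent = set(domain[0]).intersection(*domain[1:])
--         for idx in domain[0]:
--             if idx in consistent and idx not in explored_set and idx not in explorable: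
--                 if idx < 0:
--                     explorable.add(-idx)
--                 else:
--                     mines.add(idx)
--     return mines, explorable
-- ===== Notes on version B (the rewrite author's own statement) =====
-- stated objective: alternative
-- what changed: One set-intersection per domain entry replaces A's per-index rescan of every other list in the entry (and A's two-branch len==1 special case disappears); B does not mutate mine_set in place.
-- outside the precondition, e.g. on get_explorable_idx({1: []}, set(), set()): A raises IndexError, B raises IndexError
import Mathlib
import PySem

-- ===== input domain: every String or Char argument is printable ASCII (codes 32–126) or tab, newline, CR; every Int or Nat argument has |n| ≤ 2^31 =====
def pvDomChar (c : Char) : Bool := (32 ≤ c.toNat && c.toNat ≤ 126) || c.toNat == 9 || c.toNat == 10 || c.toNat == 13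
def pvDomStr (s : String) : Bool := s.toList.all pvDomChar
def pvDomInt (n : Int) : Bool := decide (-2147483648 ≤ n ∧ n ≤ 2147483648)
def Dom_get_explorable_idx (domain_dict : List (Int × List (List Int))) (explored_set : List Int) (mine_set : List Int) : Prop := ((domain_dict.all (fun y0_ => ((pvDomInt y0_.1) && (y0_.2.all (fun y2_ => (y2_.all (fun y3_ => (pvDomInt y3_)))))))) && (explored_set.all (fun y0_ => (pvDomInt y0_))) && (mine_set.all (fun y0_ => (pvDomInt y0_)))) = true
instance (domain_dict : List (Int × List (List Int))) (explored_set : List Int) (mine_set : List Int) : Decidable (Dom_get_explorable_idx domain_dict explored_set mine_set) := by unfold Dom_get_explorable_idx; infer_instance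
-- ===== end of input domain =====

-- B replaces A's per-index rescan of the other domain lists by one set-intersection per
-- domain entry (objective: alternative algorithm, same measured cost); equivalence is about
-- the RETURN value only — A mutates mine_set in place, B does not.

-- ===== PORT A =====
-- one iteration of A's outer 'for domain in domain_dict.values()' loop
def pvStepA (explored : List Int) (st : List Int × List Int) (domain : List (List Int)) : List Int × List Int :=
  if domain.length = 1 then
    (domain.headD []).foldl (fun st idx =>
      if idx ∉ explored ∧ idx ∉ st.2 then
        if idx < 0 then (st.1, PySem.Set.add st.2 (-idx)) else (PySem.Set.add st.1 idx, st.2)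
      else st) st
  else
    (domain.headD []).foldl (fun st idx =>
      let inall := (domain.drop 1).foldl (fun b other => b && decide (idx ∈ other)) true
      if idx ∉ explored ∧ idx ∉ st.2 then
        if inall then
          if idx < 0 then (st.1, PySem.Set.add st.2 (-idx)) else (PySem.Set.add st.1 idx, st.2)
        else st
      else st) st

def get_explorable_idx (domain_dict : List (Int × List (List Int))) (explored_set : List Int) (mine_set : List Int) : List Int × List Int :=
  ((PySem.Dict.ofList domain_dict).values).foldl (pvStepA explored_set) (mine_set, ([] : List Int))

-- ===== PORT B =====
-- consistent = set(domain[0]).intersection(*domain[1:])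
def pvConsistent (domain : List (List Int)) : PySem.Set Int :=
  (domain.drop 1).foldl (fun s other => PySem.Set.inter s other) (PySem.Set.ofList (domain.headD []))

def pvStepB (explored : List Int) (st : List Int × List Int) (domain : List (List Int)) : List Int × List Int :=
  let consistent := pvConsistent domain
  (domain.headD []).foldl (fun st idx =>
    if idx ∈ consistent ∧ idx ∉ explored ∧ idx ∉ st.2 then
      if idx < 0 then (st.1, PySem.Set.add st.2 (-idx)) else (PySem.Set.add st.1 idx, st.2)
    else st) st

def get_explorable_idx_alt (domain_dict : List (Int × List (List Int))) (explored_set : List Int) (mine_set : List Int) : List Int × List Int :=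
  ((PySem.Dict.ofList domain_dict).values).foldl (pvStepB explored_set) (PySem.Set.ofList mine_set, PySem.Set.empty)

-- ===== PRECONDITION & SPEC =====
-- Pre_ excludes (a) dicts having an empty list as an (effective) value, on which both Pythons
-- raise IndexError at domain[0], and (b) mine_set lists with duplicates, which do not represent
-- a Python set (the tuple element typed Set in A's signature).
def Pre_get_explorable_idx (domain_dict : List (Int × List (List Int))) (explored_set : List Int) (mine_set : List Int) : Prop :=
  (∀ d ∈ (PySem.Dict.ofList domain_dict).values, d ≠ []) ∧ mine_set.Nodup
instance (domain_dict : List (Int × List (List Int))) (explored_set : List Int) (mine_set : List Int) : Decidable (Pre_get_explorable_idx domain_dict explored_set mine_set) := by unfold Pre_get_explorable_idx; infer_instance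

def pvWitness_get_explorable_idx : (List (Int × List (List Int))) × List Int × List Int :=
  ([(1, [[-2, 3], [3, -2, 4]]), (2, [[5]])], [4], [7])

def Spec_get_explorable_idx (domain_dict : List (Int × List (List Int))) (explored_set : List Int) (mine_set : List Int) (out : List Int × List Int) : Prop := out = get_explorable_idx_alt domain_dict explored_set mine_set
instance (domain_dict : List (Int × List (List Int))) (explored_set : List Int) (mine_set : List Int) (out : List Int × List Int) : Decidable (Spec_get_explorable_idx domain_dict explored_set mine_set out) := by unfold Spec_get_explorable_idx; infer_instance

-- ===== CLAIM (what is proved, stated in full; the proofs are below) =====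
def Claim_equal_get_explorable_idx : Prop := ∀ (domain_dict : List (Int × List (List Int))) (explored_set : List Int) (mine_set : List Int), Dom_get_explorable_idx domain_dict explored_set mine_set → Pre_get_explorable_idx domain_dict explored_set mine_set → Spec_get_explorable_idx domain_dict explored_set mine_set (get_explorable_idx domain_dict explored_set mine_set)

-- ===== LEMMAS AND PROOFS =====

-- membership in a left fold of intersections
theorem pv_mem_foldl_inter (x : Int) (l : List (List Int)) (acc : PySem.Set Int) :
    x ∈ l.foldl (fun s other => PySem.Set.inter s other) acc ↔ x ∈ acc ∧ ∀ o ∈ l, x ∈ o := by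
  induction l generalizing acc with
  | nil => simp
  | cons h t ih =>
      simp only [List.foldl_cons, ih, PySem.Set.mem_inter, List.mem_cons]
      constructor
      · rintro ⟨⟨hx, ho⟩, hall⟩
        exact ⟨hx, fun o ho' => ho'.elim (fun e => e ▸ ho) (hall o)⟩
      · rintro ⟨hx, hall⟩
        exact ⟨⟨hx, hall h (Or.inl rfl)⟩, fun o ho' => hall o (Or.inr ho')⟩

-- A's 'inall' accumulator
theorem pv_foldl_and_mem (x : Int) (l : List (List Int)) (b : Bool) :
    l.foldl (fun b other => b && decide (x ∈ other)) b = (b && l.all (fun o => decide (x ∈ o))) := by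
  induction l generalizing b with
  | nil => simp
  | cons h t ih => simp [ih, Bool.and_assoc]

-- the two outer-loop bodies agree
theorem pv_step_eq (explored : List Int) (st : List Int × List Int) (domain : List (List Int)) :
    pvStepA explored st domain = pvStepB explored st domain := by
  unfold pvStepA pvStepB pvConsistent
  rcases domain with _ | ⟨d0, rest⟩
  · simp
  rcases rest with _ | ⟨d1, rest'⟩
  · -- single-entry domain: consistency is trivially true
    simp only [List.headD_cons, List.drop_succ_cons, List.length_cons, List.length_nil]
    refine PySem.List.foldl_congr_mem _ _ _ _ (fun acc x hx => ?_)
    have hmem : x ∈ PySem.Set.ofList d0 := (PySem.Set.mem_ofList d0 x).2 hx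
    by_cases h1 : x ∈ explored
    · simp [h1]
    · by_cases h2 : x ∈ acc.2 <;> simp [h1, h2, hmem]
  · -- several entries: 'inall' = membership in the intersection
    simp only [List.headD_cons, List.drop_succ_cons, List.length_cons, List.drop_zero]
    refine PySem.List.foldl_congr_mem _ _ _ _ (fun acc x hx => ?_)
    have hiff : (x ∈ (d1 :: rest').foldl (fun s other => PySem.Set.inter s other) (PySem.Set.ofList d0))
        ↔ ((d1 :: rest').foldl (fun b other => b && decide (x ∈ other)) true = true) := by
      rw [pv_mem_foldl_inter, pv_foldl_and_mem]
      simp [PySem.Set.mem_ofList, hx]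
    by_cases h1 : x ∈ explored
    · simp [h1]
    · by_cases h2 : x ∈ acc.2
      · simp [h1, h2]
      · by_cases h3 : x ∈ (d1 :: rest').foldl (fun s other => PySem.Set.inter s other) (PySem.Set.ofList d0)
        · have hbtrue := hiff.1 h3
          simp only [List.foldl_cons, Bool.true_and] at h3 hbtrue
          simp [h1, h2, h3, hbtrue]
        · have hb : ¬ ((d1 :: rest').foldl (fun b other => b && decide (x ∈ other)) true = true) :=
            fun h => h3 (hiff.2 h)
          simp only [List.foldl_cons, Bool.true_and] at h3 hb
          simp [h1, h2, h3, hb]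

-- ===== VERDICT (by name: the statement is the Claim_ definition above) =====
theorem get_explorable_idx_spec : Claim_equal_get_explorable_idx := by
  intro dd ex ms _ hpre
  unfold Pre_get_explorable_idx at hpre
  unfold Spec_get_explorable_idx get_explorable_idx get_explorable_idx_alt
  rw [PySem.Set.ofList_eq_self_of_nodup ms hpre.2]
  have hfun : pvStepA ex = pvStepB ex := funext fun st => funext fun d => pv_step_eq ex st d
  rw [hfun]
  rfl
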